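-- pv_equiv track=rewrite | github.com/jiaquan1/AmazonOA | AmazonOA/findlongeststring.py | findlongeststring
-- ===== SOURCE A (Python) =====
-- def findlongeststring(data):
--     strlen=len(data)
--     if strlen ==0:
--         return 0
--     start,end,vowels=0,strlen-1,set('aeiou')
--     for c in data:
--         if c in vowels:
--              start +=1
--         else:
--             break
--     if start>=strlen:
--         return strlen
--     while end>=0:
--         if data[end] in vowels:
--             end -=1
--         else:
--             break
--     bounlen = start+strlen-1-end
--     midlen, largest = 0,0
--     for c in data[start+1:end+1]:
--         if c in vowels:
--             midlen+=1
--         else: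
--             midlen=0
--         largest=max(largest,midlen)
--     return bounlen+largest
-- ===== SOURCE B (Python) =====
-- def findlongeststring(data):
--     # one pass: collect the lengths of the vowel segments split by consonants
--     if not data:
--         return 0
--     vowels = set('aeiou')
--     closed = []   # one closed vowel-segment length per non-vowel char seen
--     cur = 0       # length of the currently open vowel segment
--     for c in data:
--         if c in vowels:
--             cur += 1
--         else:
--             closed.append(cur)
--             cur = 0
--     if not closed:
--         return len(data)          # all vowels
--     return closed[0] + cur + max(closed[1:], default=0)
-- ===== Notes on version B (the rewrite author's own statement) =====
-- stated objective: simpler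
-- what changed: A's three scans (forward loop for the leading vowel run, backward while-loop with data[end] indexing for the trailing run, then a running max(largest,midlen) over the interior slice) are replaced by one forward pass collecting the lengths of the vowel segments split at consonants, the answer being first segment + last open segment + max of the rest; dropping the slice copy and the per-character max() call is the constant-factor gain a timing run measured.
import Mathlib
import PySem

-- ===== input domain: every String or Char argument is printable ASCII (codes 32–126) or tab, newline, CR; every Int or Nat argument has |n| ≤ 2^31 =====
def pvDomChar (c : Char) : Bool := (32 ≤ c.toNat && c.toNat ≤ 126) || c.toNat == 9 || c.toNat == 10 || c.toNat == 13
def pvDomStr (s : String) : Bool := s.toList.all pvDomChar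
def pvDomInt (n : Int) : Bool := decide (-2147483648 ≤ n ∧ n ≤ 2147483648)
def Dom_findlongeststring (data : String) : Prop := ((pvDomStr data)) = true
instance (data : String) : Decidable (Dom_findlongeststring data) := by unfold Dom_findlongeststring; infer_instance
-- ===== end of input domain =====

-- B replaces A's three scans (leading loop, backward trailing loop, interior slice scan)
-- by one pass collecting the vowel-segment lengths split at consonants; same return value, objective: simpler.


-- ===== PORT A =====
-- vowels = set('aeiou')
def pvVowelsA : PySem.Set Char := PySem.Set.ofList "aeiou".toList

-- "for c in data: if c in vowels: start += 1 else: break"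
def pvStartLoopA : List Char → Int → Int
  | [], s => s
  | c :: rest, s => if PySem.Set.contains pvVowelsA c then pvStartLoopA rest (s + 1) else s

-- "while end >= 0: if data[end] in vowels: end -= 1 else: break"
-- (the `none` arm would be Python's IndexError; the loop never reaches it since end < len(data))
def pvEndLoopA (l : List Char) (e : Int) : Int :=
  if 0 ≤ e then
    match PySem.List.pyGet? l e with
    | some c => if PySem.Set.contains pvVowelsA c then pvEndLoopA l (e - 1) else e
    | none => e
  else e
termination_by (e + 1).toNat
decreasing_by omega

-- loop body over data[start+1:end+1]: state (midlen, largest)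
def pvMidStepA (p : Int × Int) (c : Char) : Int × Int :=
  let m := if PySem.Set.contains pvVowelsA c then p.1 + 1 else 0
  (m, max p.2 m)

def findlongeststring (data : String) : Int :=
  let l := data.toList
  let strlen : Int := l.length
  if strlen == 0 then 0
  else
    let start := pvStartLoopA l 0
    if start ≥ strlen then strlen
    else
      let e := pvEndLoopA l (strlen - 1)
      let bounlen := start + strlen - 1 - e
      let r := (PySem.List.slice l (some (start + 1)) (some (e + 1))).foldl pvMidStepA (0, 0)
      bounlen + r.2

-- ===== PORT B =====
-- vowels = set('aeiou')
def pvVowelsB : PySem.Set Char := PySem.Set.ofList "aeiou".toList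

-- loop body: extend the open segment at a vowel, close it at a consonant
def pvSegStepB (st : List Int × Int) (c : Char) : List Int × Int :=
  if PySem.Set.contains pvVowelsB c then (st.1, st.2 + 1) else (st.1 ++ [st.2], 0)

def findlongeststring_alt (data : String) : Int :=
  let l := data.toList
  if l.isEmpty then 0
  else
    let st := l.foldl pvSegStepB ([], 0)
    match st.1 with                       -- "if not closed: return len(data)"; cons arm: closed[0], closed[1:]
    | [] => (l.length : Int)
    | c0 :: rest => c0 + st.2 + PySem.List.maxD rest (fun x => x) 0

-- ===== PRECONDITION & SPEC =====
def Spec_findlongeststring (data : String) (out : Int) : Prop := out = findlongeststring_alt data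
instance (data : String) (out : Int) : Decidable (Spec_findlongeststring data out) := by unfold Spec_findlongeststring; infer_instance

-- ===== CLAIM (what is proved, stated in full; the proofs are below) =====
def Claim_equal_findlongeststring : Prop := ∀ (data : String), Dom_findlongeststring data → Spec_findlongeststring data (findlongeststring data)

-- ===== LEMMAS AND PROOFS =====

-- notational helper for the proofs (both ports test the same literal set)
def pvV (c : Char) : Bool := PySem.Set.contains pvVowelsA c

@[simp] theorem memA_iff (c : Char) : (c ∈ pvVowelsA) ↔ pvV c = true := by simp [pvV]
@[simp] theorem memB_iff (c : Char) : (c ∈ pvVowelsB) ↔ pvV c = true := memA_iff c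
@[simp] theorem containsA_eq (c : Char) : PySem.Set.contains pvVowelsA c = pvV c := rfl
@[simp] theorem containsB_eq (c : Char) : PySem.Set.contains pvVowelsB c = pvV c := rfl

-- A's leading loop counts the vowel prefix
theorem startLoop_eq (l : List Char) (s : Int) :
    pvStartLoopA l s = s + ((l.takeWhile pvV).length : Int) := by
  induction l generalizing s with
  | nil => simp [pvStartLoopA]
  | cons c rest ih =>
    simp only [pvStartLoopA]
    by_cases h : pvV c
    · simp [memA_iff, h, ih]; ring
    · simp [memA_iff, h]

-- one unfolding of A's backward loop
theorem endLoop_step (l : List Char) (e : Int) (he : 0 ≤ e) (c : Char)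
    (hc : PySem.List.pyGet? l e = some c) :
    pvEndLoopA l e = if pvV c then pvEndLoopA l (e - 1) else e := by
  rw [pvEndLoopA]
  simp [he, hc, memA_iff]

theorem endLoop_neg (l : List Char) (e : Int) (he : ¬ 0 ≤ e) : pvEndLoopA l e = e := by
  rw [pvEndLoopA]; simp [he]

-- A's backward loop only looks at indices ≤ e
theorem endLoop_prefix (l1 l2 : List Char) (k : Nat) (hk : k < l1.length) :
    pvEndLoopA (l1 ++ l2) (k : Int) = pvEndLoopA l1 (k : Int) := by
  induction k with
  | zero =>
    have e1 : PySem.List.pyGet? (l1 ++ l2) ((0:Nat) : Int) = some l1[0] := by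
      rw [PySem.List.pyGet?_natCast, List.getElem?_append_left hk, List.getElem?_eq_getElem hk]
    have e2 : PySem.List.pyGet? l1 ((0:Nat) : Int) = some l1[0] := by
      rw [PySem.List.pyGet?_natCast, List.getElem?_eq_getElem hk]
    rw [endLoop_step _ _ (by simp) _ e1, endLoop_step _ _ (by simp) _ e2]
    by_cases h : pvV l1[0]
    · simp only [h, if_true]
      rw [show ((0:Nat) : Int) - 1 = -1 by norm_num]
      rw [endLoop_neg (l1 ++ l2) (-1) (by norm_num), endLoop_neg l1 (-1) (by norm_num)]
    · simp [h]
  | succ n ih =>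
    have hn : n < l1.length := by omega
    have e1 : PySem.List.pyGet? (l1 ++ l2) (((n+1):Nat) : Int) = some l1[n+1] := by
      rw [PySem.List.pyGet?_natCast, List.getElem?_append_left hk, List.getElem?_eq_getElem hk]
    have e2 : PySem.List.pyGet? l1 (((n+1):Nat) : Int) = some l1[n+1] := by
      rw [PySem.List.pyGet?_natCast, List.getElem?_eq_getElem hk]
    rw [endLoop_step _ _ (by positivity) _ e1, endLoop_step _ _ (by positivity) _ e2]
    by_cases h : pvV l1[n+1]
    · have hc : ((((n:Nat)+1):Nat) : Int) - 1 = ((n:Nat) : Int) := by push_cast; ring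
      simp only [h, if_true, hc]
      exact ih hn
    · simp [h]

-- stepping down through an all-vowel suffix
theorem endLoop_vowel_suffix (X : List Char) (hX : X ≠ []) (S : List Char) (hS : S.all pvV) :
    pvEndLoopA (X ++ S) ((X.length : Int) + (S.length : Int) - 1) =
      pvEndLoopA X ((X.length : Int) - 1) := by
  induction S using List.reverseRecOn with
  | nil => simp
  | append_singleton S' c ih =>
    have hc : pvV c := by simp [List.all_append] at hS; exact hS.2
    have hS' : S'.all pvV := by
      simp only [List.all_append] at hS
      exact (Bool.and_eq_true_iff.mp hS).1
    have hassoc : X ++ (S' ++ [c]) = (X ++ S') ++ [c] := by simp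
    have hidx : (X.length : Int) + ((S' ++ [c]).length : Int) - 1 = (((X ++ S').length : Nat) : Int) := by
      simp only [List.length_append, List.length_cons, List.length_nil]
      push_cast
      ring
    have hget : PySem.List.pyGet? (X ++ (S' ++ [c])) (((X ++ S').length : Nat) : Int) = some c := by
      rw [hassoc]
      have := PySem.List.pyGet?_append_length (X ++ S') ([] : List Char) c
      simpa using this
    rw [hidx, endLoop_step _ _ (Int.natCast_nonneg _) _ hget, if_pos hc]
    have hpos : 0 < (X ++ S').length := by
      simp only [List.length_append]
      rcases X with _ | _
      · exact absurd rfl hX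
      · simp
    have hc2 : (((X ++ S').length : Nat) : Int) - 1 = (((X ++ S').length - 1 : Nat) : Int) := by
      omega
    rw [hassoc, hc2, endLoop_prefix (X ++ S') [c] _ (by omega)]
    have hc3 : (((X ++ S').length - 1 : Nat) : Int) = (X.length : Int) + (S'.length : Int) - 1 := by
      simp only [List.length_append] at hpos ⊢
      omega
    rw [hc3]
    exact ih hS'

-- the loop stops at a final non-vowel
theorem endLoop_at_nonvowel (X' : List Char) (x : Char) (hx : pvV x = false) :
    pvEndLoopA (X' ++ [x]) (((X' ++ [x]).length : Int) - 1) = ((X' ++ [x]).length : Int) - 1 := by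
  have hidx : (((X' ++ [x]).length : Int)) - 1 = ((X'.length : Nat) : Int) := by simp
  have hget : PySem.List.pyGet? (X' ++ [x]) ((X'.length : Nat) : Int) = some x := by
    simp
  rw [hidx, endLoop_step _ _ (Int.natCast_nonneg _) _ hget, hx]
  simp

-- B's fold over an all-vowel block just extends the open segment
theorem segFold_all_vowel (S : List Char) (hS : S.all pvV) (st : List Int × Int) :
    S.foldl pvSegStepB st = (st.1, st.2 + (S.length : Int)) := by
  induction S generalizing st with
  | nil => simp
  | cons c rest ih =>
    simp only [List.all_cons, Bool.and_eq_true] at hS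
    simp only [List.foldl_cons, pvSegStepB, containsB_eq, hS.1, if_true]
    rw [ih hS.2]
    simp only [List.length_cons]
    push_cast
    refine Prod.ext rfl ?_
    simp; ring

-- the closed-segment accumulator factors as an append
theorem segFold_factor (M : List Char) (cl : List Int) (cur : Int) :
    M.foldl pvSegStepB (cl, cur) =
      (cl ++ (M.foldl pvSegStepB ([], cur)).1, (M.foldl pvSegStepB ([], cur)).2) := by
  induction M generalizing cl cur with
  | nil => simp
  | cons c M' ih =>
    simp only [List.foldl_cons, pvSegStepB, containsB_eq]
    by_cases h : pvV c
    · simp only [h, if_true]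
      exact ih cl (cur + 1)
    · simp only [h, if_false, Bool.false_eq_true]
      simp only [List.nil_append]
      rw [ih (cl ++ [cur]) 0, ih [cur] 0]
      simp

-- foldl max pulls a max out of its seed
theorem foldl_max_comm (xs : List Int) (a b : Int) :
    xs.foldl max (max a b) = max a (xs.foldl max b) := by
  induction xs generalizing b with
  | nil => simp
  | cons x t ih => simp only [List.foldl_cons, max_assoc, ih]

-- the max of all segments (closed and still open) produced from open length cur
def pvSegMax (M : List Char) (cur : Int) : Int :=
  ((M.foldl pvSegStepB ([], cur)).1).foldl max (M.foldl pvSegStepB ([], cur)).2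

theorem segMax_lb (M : List Char) (cur : Int) : cur ≤ pvSegMax M cur := by
  induction M generalizing cur with
  | nil => simp [pvSegMax]
  | cons c M' ih =>
    by_cases h : pvV c
    · have : pvSegMax (c :: M') cur = pvSegMax M' (cur + 1) := by
        simp [pvSegMax, pvSegStepB, memB_iff, h]
      rw [this]
      have := ih (cur + 1)
      omega
    · have hstep : (c :: M').foldl pvSegStepB ([], cur) = M'.foldl pvSegStepB ([cur], 0) := by
        simp [pvSegStepB, memB_iff, h]
      have hfac := segFold_factor M' [cur] 0
      simp only [pvSegMax, hstep, hfac]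
      rw [List.cons_append, List.nil_append, List.foldl_cons]
      rw [max_comm]
      rw [foldl_max_comm]
      exact le_max_left _ _

-- CORE: A's running-max scan computes the max over B's segments
theorem midFold_eq_segMax (M : List Char) (cur lg : Int) (h : cur ≤ lg) :
    (M.foldl pvMidStepA (cur, lg)).2 = max lg (pvSegMax M cur) := by
  induction M generalizing cur lg with
  | nil => simp [pvSegMax]; omega
  | cons c M' ih =>
    by_cases hc : pvV c
    · have hstep : (c :: M').foldl pvMidStepA (cur, lg) = M'.foldl pvMidStepA (cur + 1, max lg (cur + 1)) := by
        simp [pvMidStepA, memA_iff, hc]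
      have hseg : pvSegMax (c :: M') cur = pvSegMax M' (cur + 1) := by
        simp [pvSegMax, pvSegStepB, memB_iff, hc]
      rw [hstep, hseg, ih (cur + 1) (max lg (cur + 1)) (le_max_right _ _)]
      have := segMax_lb M' (cur + 1)
      omega
    · have hstep : (c :: M').foldl pvMidStepA (cur, lg) = M'.foldl pvMidStepA (0, max lg 0) := by
        simp [pvMidStepA, memA_iff, hc]
      have hseg : pvSegMax (c :: M') cur = max cur (pvSegMax M' 0) := by
        have hstep2 : (c :: M').foldl pvSegStepB ([], cur) = M'.foldl pvSegStepB ([cur], 0) := by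
          simp [pvSegStepB, memB_iff, hc]
        have hfac := segFold_factor M' [cur] 0
        simp only [pvSegMax, hstep2, hfac]
        rw [List.cons_append, List.nil_append, List.foldl_cons, max_comm, foldl_max_comm]
      rw [hstep, hseg, ih 0 (max lg 0) (le_max_right _ _)]
      have := segMax_lb M' 0
      omega

-- all produced segment lengths are nonnegative
theorem segFold_nonneg (M : List Char) (cl : List Int) (cur : Int)
    (hcl : ∀ x ∈ cl, 0 ≤ x) (hcur : 0 ≤ cur) :
    (∀ x ∈ (M.foldl pvSegStepB (cl, cur)).1, 0 ≤ x) ∧ 0 ≤ (M.foldl pvSegStepB (cl, cur)).2 := by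
  induction M generalizing cl cur with
  | nil => exact ⟨hcl, hcur⟩
  | cons c M' ih =>
    simp only [List.foldl_cons, pvSegStepB, containsB_eq]
    by_cases h : pvV c
    · simp only [h, if_true]
      exact ih cl (cur + 1) hcl (by omega)
    · simp only [h, if_false, Bool.false_eq_true]
      refine ih (cl ++ [cur]) 0 ?_ le_rfl
      intro x hx
      rcases List.mem_append.mp hx with h1 | h1
      · exact hcl x h1
      · simp at h1; omega

-- a trailing consonant closes the open segment
theorem segFold_last_nonvowel (M' : List Char) (y : Char) (hy : pvV y = false) (st : List Int × Int) :
    ((M' ++ [y]).foldl pvSegStepB st).2 = 0 := by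
  simp [List.foldl_append, pvSegStepB, memB_iff, hy]

-- evaluating Python's max(d, default=0) against a running foldl max
theorem maxD_eq_foldl_max (s1 : List Int) (hnn : ∀ z ∈ s1, 0 ≤ z) :
    PySem.List.maxD s1 (fun x => x) 0 = s1.foldl max 0 := by
  cases s1 with
  | nil => rfl
  | cons a t =>
    have ha : (0 : Int) ≤ a := hnn a (by simp)
    rw [PySem.List.maxD, PySem.List.max?_id_cons]
    simp only [Option.getD_some, List.foldl_cons, max_eq_right ha]

-- takeWhile runs through an all-true block
theorem takeWhile_append_all (P Q : List Char) (h : P.all pvV) :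
    (P ++ Q).takeWhile pvV = P ++ Q.takeWhile pvV := by
  induction P with
  | nil => simp
  | cons a t ih =>
    simp only [List.all_cons, Bool.and_eq_true] at h
    simp [h.1, ih h.2]

-- the whole computation on the underlying character list, not-all-vowel case
theorem main_branch (l P M S : List Char) (x : Char)
    (hP : P.all pvV) (hx : pvV x = false) (hS : S.all pvV)
    (hMlast : M = [] ∨ ∃ t y, M = t ++ [y] ∧ pvV y = false)
    (hdec : l = P ++ x :: (M ++ S)) :
    pvStartLoopA l 0 + (l.length : Int) - 1 - pvEndLoopA l ((l.length : Int) - 1) +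
      ((PySem.List.slice l (some (pvStartLoopA l 0 + 1))
          (some (pvEndLoopA l ((l.length : Int) - 1) + 1))).foldl pvMidStepA (0, 0)).2
      = (P.length : Int) + ((M.foldl pvSegStepB ([], 0)).2 + (S.length : Int)) +
          PySem.List.maxD (M.foldl pvSegStepB ([], 0)).1 (fun x => x) 0 := by
  -- A's leading count
  have hstart : pvStartLoopA l 0 = (P.length : Int) := by
    rw [startLoop_eq]
    have ht : l.takeWhile pvV = P := by
      rw [hdec, takeWhile_append_all _ _ hP]
      simp [hx]
    rw [ht]; ring
  -- A's backward loop
  have hXS : l = (P ++ x :: M) ++ S := by rw [hdec]; simp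
  have hXne : P ++ x :: M ≠ [] := by simp
  have hXlen : (P ++ x :: M).length = P.length + 1 + M.length := by simp; omega
  have hlen : l.length = P.length + 1 + M.length + S.length := by
    rw [hXS, List.length_append, hXlen]
  have hidx : (l.length : Int) - 1 = ((P ++ x :: M).length : Int) + (S.length : Int) - 1 := by
    rw [hXS]; push_cast [List.length_append]; ring
  have hend : pvEndLoopA l ((l.length : Int) - 1) = ((P ++ x :: M).length : Int) - 1 := by
    rw [hidx]
    conv_lhs => rw [hXS]
    rw [endLoop_vowel_suffix _ hXne _ hS]
    rcases hMlast with hM | ⟨t, y, hM, hy⟩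
    · subst hM
      have h0 : P ++ x :: ([] : List Char) = P ++ [x] := by simp
      rw [h0]
      exact endLoop_at_nonvowel P x hx
    · subst hM
      have h0 : P ++ x :: (t ++ [y]) = (P ++ x :: t) ++ [y] := by simp
      rw [h0]
      exact endLoop_at_nonvowel (P ++ x :: t) y hy
  -- the slice is exactly M
  have hslice : PySem.List.slice l (some ((P.length : Int) + 1))
      (some (((P ++ x :: M).length : Int) - 1 + 1)) = M := by
    have h1 : (P.length : Int) + 1 = ((P.length + 1 : Nat) : Int) := by push_cast; ring
    have h2 : ((P ++ x :: M).length : Int) - 1 + 1 = ((P.length + 1 + M.length : Nat) : Int) := by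
      rw [hXlen]; push_cast; ring
    rw [h1, h2, PySem.List.slice_natCast]
    have h3 : P.length + 1 + M.length - (P.length + 1) = M.length := by omega
    rw [h3]
    have h4 : l = (P ++ [x]) ++ (M ++ S) := by rw [hdec]; simp
    rw [h4]
    have h5 : P.length + 1 = (P ++ [x]).length := by simp
    rw [h5, List.drop_left, List.take_left]
  -- A's interior scan = the max of B's segments
  have hmid : ((M.foldl pvMidStepA (0, 0)).2 : Int) = pvSegMax M 0 := by
    rw [midFold_eq_segMax M 0 0 le_rfl]
    exact max_eq_right (segMax_lb M 0)
  -- B's open segment is closed by the end of M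
  have hs2 : (M.foldl pvSegStepB ([], 0)).2 = 0 := by
    rcases hMlast with hM | ⟨t, y, hM, hy⟩
    · subst hM; rfl
    · subst hM; exact segFold_last_nonvowel t y hy ([], 0)
  -- B's final max
  have hnn : ∀ z ∈ (M.foldl pvSegStepB ([], 0)).1, 0 ≤ z :=
    (segFold_nonneg M [] 0 (by simp) le_rfl).1
  have hmaxD : PySem.List.maxD (M.foldl pvSegStepB ([], 0)).1 (fun x => x) 0 = pvSegMax M 0 := by
    rw [maxD_eq_foldl_max _ hnn, pvSegMax, hs2]
  rw [hstart, hend, hslice, hmid, hs2, hmaxD, hXlen]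
  push_cast [hlen]
  ring

-- ===== VERDICT (by name: the statement is the Claim_ definition above) =====
theorem findlongeststring_spec : Claim_equal_findlongeststring := by
  intro data _
  unfold Spec_findlongeststring
  show findlongeststring data = findlongeststring_alt data
  simp only [findlongeststring, findlongeststring_alt]
  obtain ⟨l, hl⟩ : ∃ l' : List Char, data.toList = l' := ⟨_, rfl⟩
  rw [hl]
  by_cases hnil : l = []
  · subst hnil; simp
  · have hlenpos : 0 < l.length := List.length_pos_of_ne_nil hnil
    have hbeq : ¬ ((l.length : Int) = 0) := by omega
    have hemp : ¬ (l.isEmpty = true) := by simp [hnil]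
    rw [if_neg (by simpa using hbeq), if_neg hemp]
    cases hdw : l.dropWhile pvV with
    | nil =>
      -- all vowels: A returns strlen, B's fold closes nothing
      have htw : l.takeWhile pvV = l := by
        have h := List.takeWhile_append_dropWhile (p := pvV) (l := l)
        rw [hdw, List.append_nil] at h
        exact h
      have hall : l.all pvV := by rw [← htw]; exact List.all_takeWhile
      have hstart : pvStartLoopA l 0 = (l.length : Int) := by
        rw [startLoop_eq, htw]; ring
      rw [if_pos (by rw [hstart])]
      rw [segFold_all_vowel l hall ([], 0)]
    | cons x R' =>
      have hdwne : l.dropWhile pvV ≠ [] := by simp [hdw]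
      have hx : pvV x = false := by
        have h := List.head_dropWhile_not pvV hdwne
        simpa [hdw] using h
      obtain ⟨P, hPdef⟩ : ∃ P, l.takeWhile pvV = P := ⟨_, rfl⟩
      obtain ⟨M, hMdef⟩ : ∃ M, ((R'.reverse).dropWhile pvV).reverse = M := ⟨_, rfl⟩
      obtain ⟨S, hSdef⟩ : ∃ S, ((R'.reverse).takeWhile pvV).reverse = S := ⟨_, rfl⟩
      have hR' : R' = M ++ S := by
        rw [← hMdef, ← hSdef]
        rw [← List.reverse_append, List.takeWhile_append_dropWhile, List.reverse_reverse]
      have hS : S.all pvV := by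
        rw [← hSdef, List.all_reverse]; exact List.all_takeWhile
      have hPall : P.all pvV := by rw [← hPdef]; exact List.all_takeWhile
      have hMlast : M = [] ∨ ∃ t y, M = t ++ [y] ∧ pvV y = false := by
        cases hM0 : (R'.reverse).dropWhile pvV with
        | nil => left; rw [← hMdef, hM0]; rfl
        | cons y t =>
          right
          refine ⟨t.reverse, y, by rw [← hMdef, hM0]; simp, ?_⟩
          have hne : (R'.reverse).dropWhile pvV ≠ [] := by simp [hM0]
          have h := List.head_dropWhile_not pvV hne
          simpa [hM0] using h
      have hdec : l = P ++ x :: (M ++ S) := by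
        conv_lhs => rw [← List.takeWhile_append_dropWhile (p := pvV) (l := l)]
        rw [hdw, hR', hPdef]
      have hstart : pvStartLoopA l 0 = (P.length : Int) := by
        rw [startLoop_eq, hPdef]; ring
      have hPlt : P.length < l.length := by
        have := congrArg List.length hdec
        simp [List.length_append] at this
        omega
      rw [if_neg (by rw [hstart]; omega)]
      -- B's single pass over the decomposition
      have hBfold : l.foldl pvSegStepB ([], 0) =
          ((P.length : Int) :: (M.foldl pvSegStepB ([], 0)).1,
            (M.foldl pvSegStepB ([], 0)).2 + (S.length : Int)) := by
        conv_lhs => rw [hdec]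
        rw [List.foldl_append, segFold_all_vowel P hPall, List.foldl_cons]
        have hstep : pvSegStepB (([] : List Int), 0 + (P.length : Int)) x =
            ([(P.length : Int)], 0) := by
          simp [pvSegStepB, hx]
        rw [hstep, List.foldl_append, segFold_factor (M) [(P.length : Int)] 0,
          segFold_all_vowel S hS]
        simp
      rw [hBfold]
      exact main_branch l P M S x hPall hx hS hMlast hdec
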